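-- pv_equiv track=rewrite | github.com/Lamsheeper/wikihops | add_tokens.py | get_token_descriptions
-- ===== SOURCE A (Python) =====
-- def get_token_descriptions(tokens):
--     """Generate descriptions for hop-depth tokens by family and depth."""
--     # Group tokens by family letter
--     by_family = {}
--     for tok in tokens:
--         # Token format: <Xn>
--         try:
--             inner = tok.strip('<>')
--             fam = inner[0]
--             depth = int(inner[1:])
--         except Exception:
--             fam, depth = '?', -1
--         by_family.setdefault(fam, []).append((depth, tok))
--
--     descriptions = []
--     family_order = sorted(by_family.keys())
--     for fam in family_order:
--         entries = sorted(by_family[fam], key=lambda x: x[0])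
--         const_value = 5 + 2 * (ord(fam) - ord('A'))  # A->5, B->7, ..., J->23
--         tok_list = ", ".join(tok for _, tok in entries)
--         descriptions.append(f"  - Family {fam} (maps to constant {const_value}): {tok_list}")
--     return descriptions
-- ===== SOURCE B (Python) =====
-- def get_token_descriptions(tokens):
--     """Generate descriptions for hop-depth tokens by family and depth."""
--     # Parse every token once into a (family, depth, token) triple.
--     triples = []
--     for tok in tokens:
--         try:
--             inner = tok.strip('<>')
--             fam, depth = inner[0], int(inner[1:])
--         except Exception:
--             fam, depth = '?', -1
--         triples.append((fam, depth, tok))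
--     # One global stable sort by (family, depth), then a single linear pass
--     # over the consecutive family runs.
--     triples.sort(key=lambda t: (t[0], t[1]))
--     descriptions = []
--     i, n = 0, len(triples)
--     while i < n:
--         fam = triples[i][0]
--         j = i
--         while j < n and triples[j][0] == fam:
--             j += 1
--         tok_list = ", ".join(t[2] for t in triples[i:j])
--         const_value = 5 + 2 * (ord(fam) - ord('A'))
--         descriptions.append(f"  - Family {fam} (maps to constant {const_value}): {tok_list}")
--         i = j
--     return descriptions
-- ===== Notes on version B (the rewrite author's own statement) =====
-- stated objective: alternative
-- what changed: Replaces dict-bucket grouping plus a per-bucket sort with one global stable sort of (family, depth, token) triples followed by a single linear scan over consecutive family runs.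
import Mathlib
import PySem

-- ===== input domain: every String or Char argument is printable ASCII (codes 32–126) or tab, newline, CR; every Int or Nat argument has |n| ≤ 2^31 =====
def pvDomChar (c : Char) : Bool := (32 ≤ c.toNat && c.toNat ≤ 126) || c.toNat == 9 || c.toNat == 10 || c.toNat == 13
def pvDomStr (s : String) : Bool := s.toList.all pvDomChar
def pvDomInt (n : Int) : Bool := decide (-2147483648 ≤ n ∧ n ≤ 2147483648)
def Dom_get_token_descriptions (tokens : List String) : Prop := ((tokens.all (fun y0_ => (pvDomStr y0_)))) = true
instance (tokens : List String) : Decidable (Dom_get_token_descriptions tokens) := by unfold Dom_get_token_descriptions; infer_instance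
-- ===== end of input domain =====

-- B replaces dict-bucket grouping + per-bucket sorts with one global stable sort of
-- (family, depth, token) triples and a single linear scan over consecutive family runs
-- (objective: alternative; same cost). Neither version mutates its argument.

-- ===== PORT A =====
-- shared helper: the identical try/except parse both Python versions contain
-- (inner = tok.strip('<>'); fam = inner[0]; depth = int(inner[1:]); except -> ('?', -1))
def pvParseTok (tok : String) : Char × Int :=
  match (PySem.Str.stripChars tok "<>").toList with
  | [] => ('?', -1)
  | c :: rest =>
    match PySem.Int.ofChars? rest with
    | none => ('?', -1)
    | some d => (c, d)

-- by_family.setdefault(fam, []).append((depth, tok)) is ported as the equivalent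
-- d[fam] = d.get(fam, []) + [(depth, tok)]  (Dict.modify)
def get_token_descriptions (tokens : List String) : List String :=
  let by_family : PySem.Dict Char (List (Int × String)) :=
    tokens.foldl (fun d tok =>
      let p := pvParseTok tok
      d.modify p.1 [] (fun cur => cur ++ [(p.2, tok)])) PySem.Dict.empty
  let family_order := PySem.List.sorted by_family.keys (fun x => x) false
  family_order.foldl (fun descriptions fam =>
    let entries := PySem.List.sorted (by_family.getD fam []) (fun x => x.1) false
    let const_value : Int := 5 + 2 * ((fam.toNat : Int) - 65)
    let tok_list := PySem.Str.join ", " (entries.map (fun x => x.2))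
    descriptions ++ ["  - Family " ++ String.ofList [fam] ++ " (maps to constant " ++
      PySem.Int.toStr const_value ++ "): " ++ tok_list]) []

-- ===== PORT B =====
-- the inner while-loop run scanner: j advances while triples[j] has the same family
def pvRuns (l : List (Char × Int × String)) : List (Char × List (Char × Int × String)) :=
  match l with
  | [] => []
  | x :: xs =>
    (x.1, x :: xs.takeWhile (fun y => y.1 == x.1)) :: pvRuns (xs.dropWhile (fun y => y.1 == x.1))
termination_by l.length
decreasing_by
  simp only [List.length_cons]
  exact Nat.lt_succ_of_le (xs.length_dropWhile_le _)

def get_token_descriptions_alt (tokens : List String) : List String :=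
  let triples := tokens.map (fun tok => let p := pvParseTok tok; (p.1, p.2, tok))
  let s := PySem.List.sorted2 triples (fun t => t.1) (fun t => t.2.1) false
  (pvRuns s).foldl (fun descriptions r =>
    let tok_list := PySem.Str.join ", " (r.2.map (fun t => t.2.2))
    let const_value : Int := 5 + 2 * ((r.1.toNat : Int) - 65)
    descriptions ++ ["  - Family " ++ String.ofList [r.1] ++ " (maps to constant " ++
      PySem.Int.toStr const_value ++ "): " ++ tok_list]) []

-- ===== PRECONDITION & SPEC =====
def Spec_get_token_descriptions (tokens : List String) (out : List String) : Prop := out = get_token_descriptions_alt tokens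
instance (tokens : List String) (out : List String) : Decidable (Spec_get_token_descriptions tokens out) := by unfold Spec_get_token_descriptions; infer_instance

-- ===== CLAIM (what is proved, stated in full; the proofs are below) =====
def Claim_equal_get_token_descriptions : Prop := ∀ (tokens : List String), Dom_get_token_descriptions tokens → Spec_get_token_descriptions tokens (get_token_descriptions tokens)

-- ===== LEMMAS AND PROOFS =====

-- basic equations for PySem.List.insertBy
theorem pv_insertBy_nil {α : Type} (p : α → α → Bool) (x : α) :
    PySem.List.insertBy p x [] = [x] := rfl

theorem pv_insertBy_cons {α : Type} (p : α → α → Bool) (x y : α) (ys : List α) :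
    PySem.List.insertBy p x (y :: ys) =
      if p x y then x :: y :: ys else y :: PySem.List.insertBy p x ys := rfl

-- skip a prefix the new element never goes before
theorem pv_insertBy_skip {α : Type} (p : α → α → Bool) (x : α) (ys zs : List α)
    (h : ∀ y ∈ ys, p x y = false) :
    PySem.List.insertBy p x (ys ++ zs) = ys ++ PySem.List.insertBy p x zs := by
  induction ys with
  | nil => simp
  | cons y ys ih =>
    have hy : p x y = false := h y (by simp)
    simp [pv_insertBy_cons, hy, ih (fun a ha => h a (by simp [ha]))]

-- insertion stays inside a block B followed by a region it always goes before
theorem pv_insertBy_block {α : Type} (p q : α → α → Bool) (x : α) (B R : List α)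
    (hB : ∀ y ∈ B, p x y = q x y) (hR : ∀ y ∈ R, p x y = true) :
    PySem.List.insertBy p x (B ++ R) = PySem.List.insertBy q x B ++ R := by
  induction B with
  | nil =>
    cases R with
    | nil => simp [pv_insertBy_nil]
    | cons r rs => simp [pv_insertBy_nil, pv_insertBy_cons, hR r (by simp)]
  | cons b B ih =>
    have hb : p x b = q x b := hB b (by simp)
    by_cases hq : q x b = true
    · simp [pv_insertBy_cons, hb, hq]
    · have hq' : q x b = false := by simpa using hq
      simp [pv_insertBy_cons, hb, hq',
        ih (fun a ha => hB a (by simp [ha]))]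

theorem pv_insertBy_all_true {α : Type} (p : α → α → Bool) (x : α) (R : List α)
    (hR : ∀ y ∈ R, p x y = true) : PySem.List.insertBy p x R = x :: R := by
  cases R with
  | nil => rfl
  | cons r rs => simp [pv_insertBy_cons, hR r (by simp)]

theorem pv_insertBy_map {α β : Type} (p : α → α → Bool) (p' : β → β → Bool) (g : α → β)
    (hpq : ∀ a b, p' (g a) (g b) = p a b) (x : α) (l : List α) :
    PySem.List.insertBy p' (g x) (l.map g) = (PySem.List.insertBy p x l).map g := by
  induction l with
  | nil => simp [pv_insertBy_nil]
  | cons y ys ih =>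
    by_cases h : p x y = true
    · simp [pv_insertBy_cons, hpq, h]
    · have h' : p x y = false := by simpa using h
      simp [pv_insertBy_cons, hpq, h', ih]

theorem pv_flatMap_congr {α β : Type} (l : List α) (f g : α → List β)
    (h : ∀ a ∈ l, f a = g a) : l.flatMap f = l.flatMap g := by
  induction l with
  | nil => rfl
  | cons a l ih =>
    simp only [List.flatMap_cons, h a (by simp), ih (fun b hb => h b (by simp [hb]))]

-- sorted / sorted2 peel one appended element
theorem pv_sorted_snoc {α κ : Type} [LT κ] [DecidableLT κ] (l : List α) (x : α) (key : α → κ) :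
    PySem.List.sorted (l ++ [x]) key false =
      PySem.List.insertBy (fun a b => decide (key a < key b)) x (PySem.List.sorted l key false) := by
  simp [PySem.List.sorted_eq_foldl_insertBy, List.foldl_append]

theorem pv_sorted2_snoc {α κ₁ κ₂ : Type} [LT κ₁] [DecidableLT κ₁] [LT κ₂] [DecidableLT κ₂]
    (l : List α) (x : α) (k1 : α → κ₁) (k2 : α → κ₂) :
    PySem.List.sorted2 (l ++ [x]) k1 k2 false =
      PySem.List.insertBy
        (fun a b => decide (k1 a < k1 b) || (!decide (k1 b < k1 a) && decide (k2 a < k2 b)))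
        x (PySem.List.sorted2 l k1 k2 false) := by
  simp [PySem.List.sorted2, List.foldl_append]

theorem pv_sorted_map {α β κ : Type} [LT κ] [DecidableLT κ] (l : List α) (g : α → β) (key : β → κ) :
    PySem.List.sorted (l.map g) key false = (PySem.List.sorted l (fun a => key (g a)) false).map g := by
  induction l using List.reverseRecOn with
  | nil => rfl
  | append_singleton l x ih =>
    rw [List.map_append, List.map_singleton, pv_sorted_snoc, pv_sorted_snoc, ih,
      pv_insertBy_map (fun a b => decide (key (g a) < key (g b)))]
    intro a b; rfl

-- abbreviations used by the structure lemmas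
def pvLex (a b : Char × Int × String) : Bool :=
  decide (a.1 < b.1) || (!decide (b.1 < a.1) && decide (a.2.1 < b.2.1))

def pvP2 (a b : Char × Int × String) : Bool := decide (a.2.1 < b.2.1)

def pvBlock (xs : List (Char × Int × String)) (c : Char) : List (Char × Int × String) :=
  PySem.List.sorted (xs.filter (fun a => a.1 == c)) (fun t => t.2.1) false

theorem pv_mem_block {xs : List (Char × Int × String)} {c : Char}
    {y : Char × Int × String} (h : y ∈ pvBlock xs c) : y.1 = c := by
  unfold pvBlock at h
  rw [PySem.List.mem_sorted] at h
  simpa using (List.of_mem_filter h)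

-- inserting an element whose family already has a block only touches that block
theorem pv_insertBy_flatMap_mem (F : List Char) (g : Char → List (Char × Int × String))
    (x : Char × Int × String)
    (hF : F.Pairwise (· < ·)) (hg : ∀ f ∈ F, ∀ y ∈ g f, y.1 = f) (hc : x.1 ∈ F) :
    PySem.List.insertBy pvLex x (F.flatMap g) =
      F.flatMap (fun f => if f = x.1 then PySem.List.insertBy pvP2 x (g f) else g f) := by
  induction F with
  | nil => simp at hc
  | cons f F ih =>
    rcases List.pairwise_cons.mp hF with ⟨hflt, hF'⟩
    by_cases hfc : f = x.1
    · rw [List.flatMap_cons, List.flatMap_cons,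
        pv_insertBy_block pvLex pvP2 x (g f) (F.flatMap g)
          (by
            intro y hy
            have h1 : y.1 = f := hg f (by simp) y hy
            simp [pvLex, pvP2, h1, hfc])
          (by
            intro y hy
            rcases List.mem_flatMap.mp hy with ⟨f', hf', hyf⟩
            have h1 : y.1 = f' := hg f' (by simp [hf']) y hyf
            have h2 : x.1 < f' := hfc ▸ hflt f' hf'
            simp [pvLex, h1, h2]),
        if_pos hfc]
      congr 1
      apply (pv_flatMap_congr _ _ _ _).symm
      intro a ha
      have hax : a ≠ x.1 := (hfc ▸ hflt a ha).ne'
      simp [hax]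
    · have hc' : x.1 ∈ F := by
        rcases List.mem_cons.mp hc with h | h
        · exact absurd h.symm hfc
        · exact h
      have hfx : f < x.1 := hflt x.1 hc'
      rw [List.flatMap_cons, List.flatMap_cons,
        pv_insertBy_skip pvLex x (g f) (F.flatMap g)
          (by
            intro y hy
            have h1 : y.1 = f := hg f (by simp) y hy
            have h3 : ¬ (x.1 < f) := not_lt.mpr hfx.le
            simp [pvLex, h1, hfx, h3]),
        ih hF' (fun a ha y hy => hg a (by simp [ha]) y hy) hc', if_neg hfc]

-- main structure lemma: the global stable (family, depth) sort is the concatenation of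
-- per-family depth-sorted blocks, for any strictly increasing enumeration F of the families
theorem pv_sorted2_blocks (xs : List (Char × Int × String)) (F : List Char)
    (hF : F.Pairwise (· < ·)) (hmem : ∀ c, c ∈ F ↔ c ∈ xs.map (fun t => t.1)) :
    PySem.List.sorted2 xs (fun t => t.1) (fun t => t.2.1) false =
      F.flatMap (pvBlock xs) := by
  induction xs using List.reverseRecOn generalizing F with
  | nil =>
    have : F = [] := List.eq_nil_iff_forall_not_mem.mpr (by
      intro c hcF; simpa using (hmem c).mp hcF)
    subst this; rfl
  | append_singleton xs x ih =>
    by_cases hcx : x.1 ∈ xs.map (fun t => t.1)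
    · -- x's family already occurs in xs: F also enumerates xs's families
      have hmem' : ∀ d, d ∈ F ↔ d ∈ xs.map (fun t => t.1) := by
        intro d
        rw [hmem d]
        simp only [List.map_append, List.map_singleton, List.mem_append, List.mem_singleton]
        constructor
        · rintro (h | h)
          · exact h
          · exact h ▸ hcx
        · intro h; exact Or.inl h
      rw [pv_sorted2_snoc, ih F hF hmem']
      rw [show (fun (a b : Char × Int × String) =>
            decide (a.1 < b.1) || (!decide (b.1 < a.1) && decide (a.2.1 < b.2.1))) = pvLex from rfl]
      rw [pv_insertBy_flatMap_mem F (pvBlock xs) x hF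
            (fun f _ y hy => pv_mem_block hy) ((hmem' x.1).mpr hcx)]
      apply pv_flatMap_congr
      intro f hf
      by_cases hfx : f = x.1
      · rw [if_pos hfx]
        unfold pvBlock
        have : (xs ++ [x]).filter (fun a => a.1 == f) = xs.filter (fun a => a.1 == f) ++ [x] := by
          simp [List.filter_append, hfx]
        rw [this, pv_sorted_snoc]
        rfl
      · rw [if_neg hfx]
        unfold pvBlock
        have hne : ¬ (x.1 == f) = true := by simpa using fun h => hfx (by simpa using h.symm)
        have : (xs ++ [x]).filter (fun a => a.1 == f) = xs.filter (fun a => a.1 == f) := by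
          simp [List.filter_append, hne]
        rw [this]
    · -- x's family is new: F = F₁ ++ x.1 :: F₂ and x becomes a singleton block
      have hxF : x.1 ∈ F := (hmem x.1).mpr (by simp)
      obtain ⟨F₁, F₂, rfl⟩ := List.append_of_mem hxF
      rcases List.pairwise_append.mp hF with ⟨hp1, hp2c, hcross⟩
      rcases List.pairwise_cons.mp hp2c with ⟨hxlt, hp2⟩
      have hlt1 : ∀ f ∈ F₁, f < x.1 := fun f hf => hcross f hf x.1 (by simp)
      have hpair : (F₁ ++ F₂).Pairwise (· < ·) :=
        List.pairwise_append.mpr ⟨hp1, hp2,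
          fun a ha b hb => hcross a ha b (by simp [hb])⟩
      have hmem'' : ∀ d, d ∈ F₁ ++ F₂ ↔ d ∈ xs.map (fun t => t.1) := by
        intro d
        constructor
        · intro hd
          have hdne : d ≠ x.1 := by
            rcases List.mem_append.mp hd with h | h
            · exact (hlt1 d h).ne
            · exact (hxlt d h).ne'
          have : d ∈ (xs ++ [x]).map (fun t => t.1) :=
            (hmem d).mp (by
              rcases List.mem_append.mp hd with h | h
              · exact List.mem_append.mpr (Or.inl h)
              · exact List.mem_append.mpr (Or.inr (List.mem_cons_of_mem _ h)))
          rw [List.map_append, List.mem_append, List.map_singleton, List.mem_singleton] at this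
          rcases this with h | h
          · exact h
          · exact absurd h hdne
        · intro hd
          have : d ∈ F₁ ++ x.1 :: F₂ := (hmem d).mpr (by simp [hd])
          rcases List.mem_append.mp this with h | h
          · exact List.mem_append.mpr (Or.inl h)
          · rcases List.mem_cons.mp h with h | h
            · exact absurd (h ▸ hd) hcx
            · exact List.mem_append.mpr (Or.inr h)
      rw [pv_sorted2_snoc, ih (F₁ ++ F₂) hpair hmem'',
        show (fun (a b : Char × Int × String) =>
            decide (a.1 < b.1) || (!decide (b.1 < a.1) && decide (a.2.1 < b.2.1))) = pvLex from rfl,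
        List.flatMap_append,
        pv_insertBy_skip pvLex x (F₁.flatMap (pvBlock xs)) (F₂.flatMap (pvBlock xs))
          (by
            intro y hy
            rcases List.mem_flatMap.mp hy with ⟨f, hf, hyf⟩
            have h1 : y.1 = f := pv_mem_block hyf
            have h2 : f < x.1 := hlt1 f hf
            have h3 : ¬ (x.1 < f) := not_lt.mpr h2.le
            simp [pvLex, h1, h2, h3]),
        pv_insertBy_all_true pvLex x (F₂.flatMap (pvBlock xs))
          (by
            intro y hy
            rcases List.mem_flatMap.mp hy with ⟨f, hf, hyf⟩
            have h1 : y.1 = f := pv_mem_block hyf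
            have h2 : x.1 < f := hxlt f hf
            simp [pvLex, h1, h2])]
      -- now: F₁-blocks ++ [x] ++ F₂-blocks  =  blocks of xs ++ [x] over F₁ ++ x.1 :: F₂
      have hblock_eq : ∀ f, f ≠ x.1 → pvBlock (xs ++ [x]) f = pvBlock xs f := by
        intro f hfx
        unfold pvBlock
        have hne : ¬ (x.1 == f) = true := by simpa using fun h => hfx ((by simpa using h) : x.1 = f).symm
        simp [List.filter_append, hne]
      have hxblock : pvBlock (xs ++ [x]) x.1 = [x] := by
        unfold pvBlock
        have hfilter : xs.filter (fun a => a.1 == x.1) = [] := by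
          rw [List.filter_eq_nil_iff]
          intro a ha hax
          exact hcx (by
            have : a.1 = x.1 := by simpa using hax
            exact this ▸ List.mem_map_of_mem ha)
        simp [List.filter_append, hfilter]
        rfl
      rw [List.flatMap_append, List.flatMap_cons, hxblock,
        pv_flatMap_congr F₁ (pvBlock (xs ++ [x])) (pvBlock xs)
          (fun f hf => hblock_eq f (hlt1 f hf).ne),
        pv_flatMap_congr F₂ (pvBlock (xs ++ [x])) (pvBlock xs)
          (fun f hf => hblock_eq f (hxlt f hf).ne')]
      simp

-- takeWhile / dropWhile over a satisfied prefix
theorem pv_takeWhile_append_all {α : Type} (p : α → Bool) (B R : List α)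
    (h : ∀ y ∈ B, p y = true) : (B ++ R).takeWhile p = B ++ R.takeWhile p := by
  induction B with
  | nil => simp
  | cons b B ih =>
    simp [h b (by simp), ih (fun a ha => h a (by simp [ha]))]

theorem pv_dropWhile_append_all {α : Type} (p : α → Bool) (B R : List α)
    (h : ∀ y ∈ B, p y = true) : (B ++ R).dropWhile p = R.dropWhile p := by
  induction B with
  | nil => simp
  | cons b B ih =>
    simp [h b (by simp), ih (fun a ha => h a (by simp [ha]))]

-- runs of a flatMap of nonempty single-family blocks with pairwise-distinct families
theorem pv_runs_flatMap (F : List Char) (g : Char → List (Char × Int × String))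
    (hne : ∀ f ∈ F, g f ≠ []) (hg : ∀ f ∈ F, ∀ y ∈ g f, y.1 = f)
    (hd : F.Pairwise (· ≠ ·)) :
    pvRuns (F.flatMap g) = F.map (fun f => (f, g f)) := by
  induction F with
  | nil => rw [List.flatMap_nil, pvRuns]; rfl
  | cons f F ih =>
    rcases List.pairwise_cons.mp hd with ⟨hfne, hd'⟩
    obtain ⟨b, B, hgf⟩ := List.exists_cons_of_ne_nil (hne f (by simp))
    have hb1 : b.1 = f := hg f (by simp) b (by simp [hgf])
    have hB : ∀ y ∈ B, (y.1 == b.1) = true := by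
      intro y hy
      have : y.1 = f := hg f (by simp) y (by simp [hgf, hy])
      simp [this, hb1]
    have hrest_take : (F.flatMap g).takeWhile (fun y => y.1 == b.1) = [] := by
      cases hFg : F.flatMap g with
      | nil => rfl
      | cons r rs =>
        have hr : r ∈ F.flatMap g := by simp [hFg]
        rcases List.mem_flatMap.mp hr with ⟨f', hf', hrf⟩
        -- the head of the flatMap is the head of the first block, so f' is the head of F;
        -- for takeWhile we only need r's family to differ from f, true for every f' ∈ F
        have h1 : r.1 = f' := hg f' (by simp [hf']) r hrf
        have h2 : ¬ (r.1 == b.1) = true := by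
          simp [h1, hb1]
          exact fun h => (hfne f' hf') h.symm
        exact List.takeWhile_cons_of_neg h2
    have hrest_drop : (F.flatMap g).dropWhile (fun y => y.1 == b.1) = F.flatMap g := by
      cases hFg : F.flatMap g with
      | nil => rfl
      | cons r rs =>
        have hr : r ∈ F.flatMap g := by simp [hFg]
        rcases List.mem_flatMap.mp hr with ⟨f', hf', hrf⟩
        have h1 : r.1 = f' := hg f' (by simp [hf']) r hrf
        have h2 : ¬ (r.1 == b.1) = true := by
          simp [h1, hb1]
          exact fun h => (hfne f' hf') h.symm
        exact List.dropWhile_cons_of_neg h2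
    rw [List.flatMap_cons, hgf]
    show pvRuns (b :: (B ++ F.flatMap g)) = _
    rw [pvRuns]
    rw [pv_takeWhile_append_all _ B _ hB, pv_dropWhile_append_all _ B _ hB,
      hrest_take, hrest_drop,
      ih (fun a ha => hne a (by simp [ha])) (fun a ha y hy => hg a (by simp [ha]) y hy) hd']
    simp [hb1, hgf]

-- canonical middle form both ports are reduced to
def pvTriples (tokens : List String) : List (Char × Int × String) :=
  tokens.map (fun tok => ((pvParseTok tok).1, (pvParseTok tok).2, tok))

def pvFams (tokens : List String) : List Char :=
  PySem.List.sorted (PySem.Set.ofList ((pvTriples tokens).map (fun t => t.1))) (fun x => x) false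

def pvFmt (fam : Char) (toks : List String) : String :=
  "  - Family " ++ String.ofList [fam] ++ " (maps to constant " ++
    PySem.Int.toStr (5 + 2 * ((fam.toNat : Int) - 65)) ++ "): " ++ PySem.Str.join ", " toks

theorem pvFams_pairwise (tokens : List String) : (pvFams tokens).Pairwise (· < ·) :=
  PySem.List.sorted_ofList_pairwise_lt _

theorem pvFams_mem (tokens : List String) :
    ∀ c, c ∈ pvFams tokens ↔ c ∈ (pvTriples tokens).map (fun t => t.1) := by
  intro c
  unfold pvFams
  rw [PySem.List.mem_sorted]
  exact PySem.Set.mem_ofList _ _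

theorem pvBlock_ne_nil (tokens : List String) :
    ∀ f ∈ pvFams tokens, pvBlock (pvTriples tokens) f ≠ [] := by
  intro f hf
  unfold pvBlock
  rw [Ne, PySem.List.sorted_eq_nil_iff, List.filter_eq_nil_iff]
  intro hall
  rcases List.mem_map.mp ((pvFams_mem tokens f).mp hf) with ⟨t, ht, hteq⟩
  exact hall t ht (by simp [hteq])

theorem pvA_char (tokens : List String) :
    get_token_descriptions tokens =
      (pvFams tokens).map
        (fun fam => pvFmt fam ((pvBlock (pvTriples tokens) fam).map (fun t => t.2.2))) := by
  have hfold : tokens.foldl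
      (fun d tok => d.modify (pvParseTok tok).1 [] (fun cur => cur ++ [((pvParseTok tok).2, tok)]))
      PySem.Dict.empty
      = (pvTriples tokens).foldl (fun d p => d.modify p.1 [] (fun cur => cur ++ [p.2]))
          PySem.Dict.empty := by
    unfold pvTriples
    rw [List.foldl_map]
  have hget : ∀ c, ((pvTriples tokens).foldl
        (fun d p => d.modify p.1 [] (fun cur => cur ++ [p.2])) PySem.Dict.empty).getD c []
      = ((pvTriples tokens).filter (fun p => p.1 == c)).map (fun p => p.2) := by
    intro c
    simpa using PySem.Dict.getD_foldl_modify_append (pvTriples tokens) PySem.Dict.empty c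
  have hkeys : ((pvTriples tokens).foldl
        (fun d p => d.modify p.1 [] (fun cur => cur ++ [p.2])) PySem.Dict.empty).keys
      = PySem.Set.ofList ((pvTriples tokens).map (fun t => t.1)) := by
    have h := PySem.Dict.keys_foldl_modify_key (pvTriples tokens) (fun p => p.1) []
      (fun _ p => fun cur => cur ++ [p.2]) PySem.Dict.empty
    simpa [PySem.Dict.keys_empty, PySem.Set.update_nil_left] using h
  unfold get_token_descriptions
  simp only [hfold, hkeys, PySem.List.foldl_append_singleton_eq_map, List.nil_append]
  apply List.map_congr_left
  intro fam _
  rw [hget fam, pv_sorted_map ((pvTriples tokens).filter (fun p => p.1 == fam))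
        (fun p => p.2) (fun x => x.1), List.map_map]
  rfl

theorem pvB_char (tokens : List String) :
    get_token_descriptions_alt tokens =
      (pvFams tokens).map
        (fun fam => pvFmt fam ((pvBlock (pvTriples tokens) fam).map (fun t => t.2.2))) := by
  unfold get_token_descriptions_alt
  have htr : tokens.map (fun tok => ((pvParseTok tok).1, (pvParseTok tok).2, tok))
      = pvTriples tokens := rfl
  simp only [htr]
  rw [pv_sorted2_blocks (pvTriples tokens) (pvFams tokens) (pvFams_pairwise tokens)
        (pvFams_mem tokens),
      pv_runs_flatMap (pvFams tokens) (pvBlock (pvTriples tokens)) (pvBlock_ne_nil tokens)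
        (fun f _ y hy => pv_mem_block hy)
        ((pvFams_pairwise tokens).imp (fun h => h.ne)),
      List.foldl_map]
  simp only [PySem.List.foldl_append_singleton_eq_map, List.nil_append]
  rfl

-- ===== VERDICT (by name: the statement is the Claim_ definition above) =====
theorem get_token_descriptions_spec : Claim_equal_get_token_descriptions := by
  intro tokens _
  unfold Spec_get_token_descriptions
  rw [pvA_char, pvB_char]
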